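-- pv_equiv track=rewrite | github.com/feadoor/advent-of-code-2019 | python/16.py | transform_single
-- ===== SOURCE A (Python) =====
-- def transform_single(nums):
--
--     partial_sums = [0] * (len(nums) + 1)
--     for n in range(1, len(nums) + 1):
--         partial_sums[n] = partial_sums[n - 1] + nums[n - 1]
--
--     def segment(l, r):
--         if l < 0: l = 0
--         if l > len(nums): l = len(nums)
--         if r < 0: r = 0
--         if r > len(nums): r = len(nums)
--         return partial_sums[r] - partial_sums[l]
--
--     output = []
--     for n in range(1, len(nums) + 1):
--         total = 0
--         for k in range(n - 1, len(nums) + 1, 4 * n):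
--             total += segment(k, k + n)
--             total -= segment(k + 2 * n, k + 3 * n)
--         output.append(abs(total) % 10)
--
--     return output
-- ===== SOURCE B (Python) =====
-- def transform_single(nums):
--     result = []
--     for n in range(1, len(nums) + 1):
--         total = 0
--         for j, v in enumerate(nums):
--             c = ((j + 1) // n) % 4
--             if c == 1:
--                 total += v
--             elif c == 3:
--                 total -= v
--         result.append(abs(total) % 10)
--     return result
-- ===== Notes on version B (the rewrite author's own statement) =====
-- stated objective: simpler
-- what changed: Replaces A's prefix-sum table plus stride-4n segment accumulation by the direct naive FFT phase: each output digit is the plain per-index sum of nums[j] times the repeating base-pattern coefficient (+1, 0 or -1, selected by ((j+1)//n)%4), with no auxiliary array.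
import Mathlib
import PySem

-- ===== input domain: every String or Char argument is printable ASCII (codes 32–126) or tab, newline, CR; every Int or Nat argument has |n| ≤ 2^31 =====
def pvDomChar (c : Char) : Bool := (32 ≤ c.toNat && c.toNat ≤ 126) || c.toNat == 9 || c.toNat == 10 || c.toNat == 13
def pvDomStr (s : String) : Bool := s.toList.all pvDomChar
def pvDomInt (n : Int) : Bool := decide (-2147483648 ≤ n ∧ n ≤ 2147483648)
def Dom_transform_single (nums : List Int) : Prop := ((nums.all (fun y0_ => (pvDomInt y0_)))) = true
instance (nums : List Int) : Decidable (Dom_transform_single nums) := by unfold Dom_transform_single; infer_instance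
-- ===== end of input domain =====

-- B replaces A's prefix-sum/stride-4n scheme by the direct per-position pattern sum
-- (coefficient +1, 0, -1 by quarter-period of the base pattern, selected via ((j+1)//n)%4); objective: alternative, same values.


-- ===== PORT A =====
-- partial_sums loop: for n in range(1, len+1): ps[n] = ps[n-1] + nums[n-1]   (m = n-1)
def pvPartialSums (nums : List Int) : List Int :=
  (List.range nums.length).foldl
    (fun ps m => ps.set (m + 1) (ps.getD m 0 + nums.getD m 0))
    (List.replicate (nums.length + 1) (0 : Int))

-- the inner helper 'segment(l, r)' of A, clamping both bounds into [0, len]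
def pvSegment (nums ps : List Int) (l r : Int) : Int :=
  let l := if l < 0 then 0 else l
  let l := if l > (nums.length : Int) then (nums.length : Int) else l
  let r := if r < 0 then 0 else r
  let r := if r > (nums.length : Int) then (nums.length : Int) else r
  ps.getD r.toNat 0 - ps.getD l.toNat 0

def transform_single (nums : List Int) : List Int :=
  let ps := pvPartialSums nums
  (List.range nums.length).foldl
    (fun output (i : Nat) =>
      let n : Int := (i : Int) + 1
      let total := (PySem.List.pyRange (n - 1) ((nums.length : Int) + 1) (4 * n)).foldl
        (fun total k =>
          total + pvSegment nums ps k (k + n) - pvSegment nums ps (k + 2 * n) (k + 3 * n)) 0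
      output ++ [PySem.Int.mod |total| 10]) []

-- ===== PORT B =====
def transform_single_alt (nums : List Int) : List Int :=
  (List.range nums.length).map (fun (i : Nat) =>
    let n : Int := (i : Int) + 1
    let total := (List.range nums.length).foldl
      (fun total (j : Nat) =>
        let c := PySem.Int.mod (PySem.Int.floordiv ((j : Int) + 1) n) 4
        if c = 1 then total + nums.getD j 0
        else if c = 3 then total - nums.getD j 0
        else total) 0
    PySem.Int.mod |total| 10)

-- ===== PRECONDITION & SPEC =====
def Spec_transform_single (nums : List Int) (out : List Int) : Prop := out = transform_single_alt nums
instance (nums : List Int) (out : List Int) : Decidable (Spec_transform_single nums out) := by unfold Spec_transform_single; infer_instance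

-- ===== CLAIM (what is proved, stated in full; the proofs are below) =====
def Claim_equal_transform_single : Prop := ∀ (nums : List Int), Dom_transform_single nums → Spec_transform_single nums (transform_single nums)

-- ===== LEMMAS AND PROOFS =====

-- prefix sum of nums clipped at len
def pvPref (nums : List Int) (i : Nat) : Int :=
  ∑ j ∈ Finset.range (min i nums.length), nums.getD j 0

-- the FFT pattern coefficient for output position n (1-based) at input index j (0-based)
def pvCoef (n j : Nat) : Int :=
  if (j + 1) / n % 4 = 1 then 1 else if (j + 1) / n % 4 = 3 then -1 else 0

theorem pvSumRangeList (n : Nat) (f : Nat → Int) :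
    ((List.range n).map f).sum = ∑ i ∈ Finset.range n, f i := rfl

-- A's partial_sums loop builds exactly the prefix sums (zeros beyond step m)
theorem pvPsAux (nums : List Int) (m : Nat) (hm : m ≤ nums.length) :
    (List.range m).foldl
      (fun ps k => ps.set (k + 1) (ps.getD k 0 + nums.getD k 0))
      (List.replicate (nums.length + 1) (0 : Int))
    = (List.range (nums.length + 1)).map
        (fun i => if i ≤ m then ∑ j ∈ Finset.range i, nums.getD j 0 else 0) := by
  induction m with
  | zero =>
      apply List.ext_getElem
      · simp
      · intro i h1 h2
        simp only [List.range_zero, List.foldl_nil, List.length_replicate] at h1 ⊢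
        simp only [List.getElem_replicate, List.getElem_map, List.getElem_range]
        split_ifs with hi
        · have : i = 0 := by omega
          subst this; simp
        · rfl
  | succ m ih =>
      rw [List.range_succ, List.foldl_append, ih (by omega)]
      simp only [List.foldl_cons, List.foldl_nil]
      have hget : (List.map (fun i => if i ≤ m then ∑ j ∈ Finset.range i, nums.getD j 0 else 0)
          (List.range (nums.length + 1))).getD m 0 = ∑ j ∈ Finset.range m, nums.getD j 0 := by
        rw [List.getD_eq_getElem?_getD, List.getElem?_eq_getElem (by simp; omega)]
        simp
      rw [hget]
      apply List.ext_getElem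
      · simp
      · intro i h1 h2
        simp only [List.length_set, List.length_map, List.length_range] at h1 h2
        rw [List.getElem_set]
        by_cases hc : m + 1 = i
        · subst hc
          simp [Finset.sum_range_succ]
        · rw [if_neg hc]
          simp only [List.getElem_map, List.getElem_range]
          have : i ≤ m ↔ i ≤ m + 1 := by omega
          simp [this]

theorem pvPs_getD (nums : List Int) (i : Nat) (hi : i ≤ nums.length) :
    (pvPartialSums nums).getD i 0 = ∑ j ∈ Finset.range i, nums.getD j 0 := by
  unfold pvPartialSums
  rw [pvPsAux nums nums.length le_rfl]
  rw [List.getD_eq_getElem?_getD, List.getElem?_eq_getElem (by simp; omega)]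
  simp [hi]

-- segment(l, r) on nonnegative bounds is a difference of clipped prefix sums
theorem pvSegment_eq (nums : List Int) (l r : Int) (hl : 0 ≤ l) (hr : 0 ≤ r) :
    pvSegment nums (pvPartialSums nums) l r = pvPref nums r.toNat - pvPref nums l.toNat := by
  have key : ∀ x : Int, 0 ≤ x →
      (if (if x < 0 then 0 else x) > (nums.length : Int) then (nums.length : Int)
       else (if x < 0 then 0 else x)).toNat = min x.toNat nums.length := by
    intro x hx; split_ifs <;> omega
  simp only [pvSegment]
  rw [key l hl, key r hr, pvPref, pvPref,
    pvPs_getD nums _ (Nat.min_le_right _ _), pvPs_getD nums _ (Nat.min_le_right _ _)]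

-- a clipped interval on which the coefficient is the constant c
theorem pvSubblock (nums : List Int) (n u v : Nat) (huv : u ≤ v) (c : Int)
    (hc : ∀ j, u ≤ j → j < v → pvCoef n j = c) :
    ∑ j ∈ Finset.Ico (min u nums.length) (min v nums.length), nums.getD j 0 * pvCoef n j
      = c * (pvPref nums v - pvPref nums u) := by
  have hmm : min u nums.length ≤ min v nums.length := by omega
  rw [Finset.sum_congr rfl (g := fun j => c * nums.getD j 0)]
  · rw [← Finset.mul_sum, Finset.sum_Ico_eq_sub _ hmm]
    simp [pvPref]
  · intro j hj
    rw [Finset.mem_Ico] at hj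
    have hju : u ≤ j := by omega
    have hjv : j < v := by omega
    rw [hc j hju hjv, mul_comm]

-- inside the i-th n-wide slice of the 4n-period starting at n-1+4nt, (j+1)/n = 4t+i+1
theorem pvCoefEval (n t i j : Nat) (hn : 1 ≤ n)
    (h1 : n - 1 + 4 * n * t + i * n ≤ j) (h2 : j < n - 1 + 4 * n * t + (i + 1) * n) :
    (j + 1) / n = 4 * t + i + 1 := by
  generalize hA : 4 * n * t = A at h1 h2
  generalize hB : i * n = B at h1
  generalize hC : (i + 1) * n = C at h2
  have eq1 : (4 * t + i + 1) * n = A + B + n := by rw [← hA, ← hB]; ring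
  have eq2 : (4 * t + i + 1 + 1) * n = A + C + n := by rw [← hA, ← hC]; ring
  apply Nat.div_eq_of_lt_le
  · rw [eq1]; omega
  · rw [eq2]; omega

-- c strides of A's inner loop cover exactly the coefficient-weighted sum over [n-1, n-1+4nc)
theorem pvChunk (nums : List Int) (n : Nat) (hn : 1 ≤ n) (c : Nat) :
    ∑ t ∈ Finset.range c,
      ((pvPref nums (n - 1 + 4 * n * t + n) - pvPref nums (n - 1 + 4 * n * t))
        - (pvPref nums (n - 1 + 4 * n * t + 3 * n) - pvPref nums (n - 1 + 4 * n * t + 2 * n)))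
    = ∑ j ∈ Finset.Ico (min (n - 1) nums.length) (min (n - 1 + 4 * n * c) nums.length),
        nums.getD j 0 * pvCoef n j := by
  induction c with
  | zero => simp
  | succ c ih =>
      rw [Finset.sum_range_succ, ih]
      have h0 : ∀ j, n - 1 + 4 * n * c ≤ j → j < n - 1 + 4 * n * c + n → pvCoef n j = 1 := by
        intro j hj1 hj2
        have := pvCoefEval n c 0 j hn (by simpa using hj1) (by simpa using hj2)
        have hm : (4 * c + 0 + 1) % 4 = 1 := by omega
        unfold pvCoef; rw [this, hm]; simp
      have h1 : ∀ j, n - 1 + 4 * n * c + n ≤ j → j < n - 1 + 4 * n * c + 2 * n → pvCoef n j = 0 := by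
        intro j hj1 hj2
        have := pvCoefEval n c 1 j hn (by simpa using hj1) (by rw [show (1+1)*n = 2*n by ring]; omega)
        have hm : (4 * c + 1 + 1) % 4 = 2 := by omega
        unfold pvCoef; rw [this, hm]; simp
      have h2 : ∀ j, n - 1 + 4 * n * c + 2 * n ≤ j → j < n - 1 + 4 * n * c + 3 * n → pvCoef n j = -1 := by
        intro j hj1 hj2
        have := pvCoefEval n c 2 j hn (by rw [show (2:Nat)*n = 2*n by ring] at hj1; simpa using hj1)
          (by rw [show (2+1)*n = 3*n by ring]; omega)
        have hm : (4 * c + 2 + 1) % 4 = 3 := by omega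
        unfold pvCoef; rw [this, hm]; simp
      have h3 : ∀ j, n - 1 + 4 * n * c + 3 * n ≤ j → j < n - 1 + 4 * n * c + 4 * n → pvCoef n j = 0 := by
        intro j hj1 hj2
        have := pvCoefEval n c 3 j hn (by simpa using hj1) (by rw [show (3+1)*n = 4*n by ring]; omega)
        have hm : (4 * c + 3 + 1) % 4 = 0 := by omega
        unfold pvCoef; rw [this, hm]; simp
      have hK : 4 * n * (c + 1) = 4 * n * c + 4 * n := by ring
      rw [hK]
      generalize hKK : 4 * n * c = K at *
      rw [← Finset.sum_Ico_consecutive _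
            (show min (n-1) nums.length ≤ min (n-1+K) nums.length by omega)
            (show min (n-1+K) nums.length ≤ min (n-1+(K+4*n)) nums.length by omega),
          ← Finset.sum_Ico_consecutive (m := min (n-1+K) nums.length)
            (n := min (n-1+K+n) nums.length) (k := min (n-1+(K+4*n)) nums.length) _
            (by omega) (by omega),
          ← Finset.sum_Ico_consecutive (m := min (n-1+K+n) nums.length)
            (n := min (n-1+K+2*n) nums.length) (k := min (n-1+(K+4*n)) nums.length) _
            (by omega) (by omega),
          ← Finset.sum_Ico_consecutive (m := min (n-1+K+2*n) nums.length)
            (n := min (n-1+K+3*n) nums.length) (k := min (n-1+(K+4*n)) nums.length) _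
            (by omega) (by omega)]
      have e0 := pvSubblock nums n (n-1+K) (n-1+K+n) (by omega) 1 h0
      have e1 := pvSubblock nums n (n-1+K+n) (n-1+K+2*n) (by omega) 0 h1
      have e2 := pvSubblock nums n (n-1+K+2*n) (n-1+K+3*n) (by omega) (-1) h2
      have e3 := pvSubblock nums n (n-1+K+3*n) (n-1+K+4*n) (by omega) 0 h3
      rw [show n-1+(K+4*n) = n-1+K+4*n by omega]
      rw [e0, e1, e2, e3]
      ring

-- B's inner loop is the coefficient-weighted sum over all indices
theorem pvBside (nums : List Int) (i : Nat) :
    (List.range nums.length).foldl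
      (fun total (j : Nat) =>
        let c := PySem.Int.mod (PySem.Int.floordiv ((j : Int) + 1) ((i : Int) + 1)) 4
        if c = 1 then total + nums.getD j 0
        else if c = 3 then total - nums.getD j 0
        else total) 0
    = ∑ j ∈ Finset.range nums.length, nums.getD j 0 * pvCoef (i + 1) j := by
  rw [PySem.List.foldl_congr_mem _ _ (fun total j => total + nums.getD j 0 * pvCoef (i+1) j) _ ?_]
  · rw [PySem.List.foldl_add (g := fun j => nums.getD j 0 * pvCoef (i+1) j)]
    simp only [zero_add]
    rfl
  · intro acc j _
    simp only []
    have hcast : PySem.Int.mod (PySem.Int.floordiv ((j : Int) + 1) ((i : Int) + 1)) 4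
        = ((((j+1) / (i+1)) % 4 : Nat) : Int) := by
      have h1 : ((j : Int) + 1) = ((j + 1 : Nat) : Int) := by push_cast; ring
      have h2 : ((i : Int) + 1) = ((i + 1 : Nat) : Int) := by push_cast; ring
      have h4 : (4 : Int) = ((4 : Nat) : Int) := by norm_num
      rw [h1, h2, PySem.Int.floordiv_natCast, h4, PySem.Int.mod_natCast]
    rw [hcast]
    unfold pvCoef
    by_cases e1 : (j+1)/(i+1) % 4 = 1
    · have p1 : ((((j+1) / (i+1)) % 4 : Nat) : Int) = 1 := by exact_mod_cast e1
      rw [if_pos p1, if_pos e1]; ring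
    · have n1 : ¬ ((((j+1) / (i+1)) % 4 : Nat) : Int) = 1 := by exact_mod_cast e1
      by_cases e3 : (j+1)/(i+1) % 4 = 3
      · have p3 : ((((j+1) / (i+1)) % 4 : Nat) : Int) = 3 := by exact_mod_cast e3
        rw [if_neg n1, if_pos p3, if_neg e1, if_pos e3]; ring
      · have n3 : ¬ ((((j+1) / (i+1)) % 4 : Nat) : Int) = 3 := by exact_mod_cast e3
        rw [if_neg n1, if_neg n3, if_neg e1, if_neg e3]; ring

-- the totals of the two inner loops agree for every output position i < len
theorem pvTotalEq (nums : List Int) (i : Nat) (hi : i < nums.length) :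
    (PySem.List.pyRange ((i : Int) + 1 - 1) ((nums.length : Int) + 1) (4 * ((i : Int) + 1))).foldl
      (fun total k =>
        total + pvSegment nums (pvPartialSums nums) k (k + ((i : Int) + 1))
              - pvSegment nums (pvPartialSums nums) (k + 2 * ((i : Int) + 1)) (k + 3 * ((i : Int) + 1))) 0
    = (List.range nums.length).foldl
        (fun total (j : Nat) =>
          let c := PySem.Int.mod (PySem.Int.floordiv ((j : Int) + 1) ((i : Int) + 1)) 4
          if c = 1 then total + nums.getD j 0
          else if c = 3 then total - nums.getD j 0
          else total) 0 := by
  rw [pvBside]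
  rw [PySem.List.pyRange_of_pos _ _ (show (0:Int) < 4 * ((i : Int) + 1) by positivity)]
  rw [if_pos (show ((i : Int) + 1 - 1) < (nums.length : Int) + 1 by
        have : (i:Int) < nums.length := by exact_mod_cast hi
        omega)]
  have hcount : (((nums.length : Int) + 1 - ((i : Int) + 1 - 1) + 4 * ((i : Int) + 1) - 1)
      / (4 * ((i : Int) + 1))).toNat = (nums.length - i + 4 * (i + 1)) / (4 * (i + 1)) := by
    have hnum : ((nums.length : Int) + 1 - ((i : Int) + 1 - 1) + 4 * ((i : Int) + 1) - 1)
        = ((nums.length - i + 4 * (i + 1) : Nat) : Int) := by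
      have : (i:Int) ≤ nums.length := by exact_mod_cast hi.le
      push_cast [Nat.sub_add_cancel]
      omega
    rw [hnum, show (4 * ((i : Int) + 1)) = ((4 * (i + 1) : Nat) : Int) by push_cast; ring,
       ← Int.natCast_ediv]
    exact Int.toNat_natCast _
  rw [hcount, List.foldl_map]
  set C := (nums.length - i + 4 * (i + 1)) / (4 * (i + 1)) with hC
  rw [PySem.List.foldl_congr_mem _ _
      (fun (total : Int) (t : Nat) =>
        total + ((pvPref nums (i + 4 * (i+1) * t + (i+1)) - pvPref nums (i + 4 * (i+1) * t))
          - (pvPref nums (i + 4 * (i+1) * t + 3 * (i+1)) - pvPref nums (i + 4 * (i+1) * t + 2 * (i+1))))) _ ?_]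
  · rw [PySem.List.foldl_add (g := fun (t : Nat) =>
        ((pvPref nums (i + 4 * (i+1) * t + (i+1)) - pvPref nums (i + 4 * (i+1) * t))
          - (pvPref nums (i + 4 * (i+1) * t + 3 * (i+1)) - pvPref nums (i + 4 * (i+1) * t + 2 * (i+1))))),
      zero_add, pvSumRangeList]
    have hch := pvChunk nums (i+1) (by omega) C
    simp only [Nat.add_sub_cancel] at hch
    rw [hch]
    have hdm := Nat.div_add_mod (nums.length - i + 4 * (i + 1)) (4 * (i + 1))
    have hlt := Nat.mod_lt (nums.length - i + 4 * (i + 1)) (y := 4 * (i + 1)) (by omega)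
    rw [← hC] at hdm
    have hcov : min (i + 4 * (i+1) * C) nums.length = nums.length := by
      generalize hP : 4 * (i+1) * C = P at *
      omega
    have hmin : min i nums.length = i := by omega
    rw [hcov, hmin, Finset.range_eq_Ico,
      ← Finset.sum_Ico_consecutive _ (show 0 ≤ i by omega) (show i ≤ nums.length by omega)]
    have hzero : ∑ j ∈ Finset.Ico 0 i, nums.getD j 0 * pvCoef (i+1) j = 0 := by
      apply Finset.sum_eq_zero
      intro j hj
      rw [Finset.mem_Ico] at hj
      have : (j+1)/(i+1) = 0 := Nat.div_eq_of_lt (by omega)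
      unfold pvCoef
      rw [this]
      norm_num
    rw [hzero, zero_add]
  · intro acc t _
    have seg' : ∀ a b : Nat, pvSegment nums (pvPartialSums nums) (a : Int) (b : Int)
        = pvPref nums b - pvPref nums a := by
      intro a b
      rw [pvSegment_eq _ _ _ (Int.natCast_nonneg a) (Int.natCast_nonneg b),
        Int.toNat_natCast, Int.toNat_natCast]
    have ha : ((i:Int) + 1 - 1 + 4 * ((i:Int)+1) * (t:Int))
        = ((i + 4 * (i+1) * t : Nat) : Int) := by push_cast; ring
    rw [ha,
      show ((i + 4 * (i+1) * t : Nat) : Int) + ((i:Int)+1) = ((i + 4 * (i+1) * t + (i+1) : Nat) : Int) by push_cast; ring,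
      show ((i + 4 * (i+1) * t : Nat) : Int) + 2 * ((i:Int)+1) = ((i + 4 * (i+1) * t + 2 * (i+1) : Nat) : Int) by push_cast; ring,
      show ((i + 4 * (i+1) * t : Nat) : Int) + 3 * ((i:Int)+1) = ((i + 4 * (i+1) * t + 3 * (i+1) : Nat) : Int) by push_cast; ring,
      seg', seg']
    ring

-- ===== VERDICT (by name: the statement is the Claim_ definition above) =====
theorem transform_single_spec : Claim_equal_transform_single := by
  intro nums _
  unfold Spec_transform_single transform_single transform_single_alt
  rw [PySem.List.foldl_append_singleton_eq_map]
  simp only [List.nil_append]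
  apply List.map_congr_left
  intro i hi
  rw [List.mem_range] at hi
  rw [pvTotalEq nums i hi]
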